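-- pv_equiv track=rewrite | github.com/SestrenExsis/CodeKatas | adventofcode/AdventOfCode2015.py | solve2_poorly
-- ===== SOURCE A (Python) =====
-- def solve2_poorly(target_present_count):
--     target_sum_of_divisors = 1 + (target_present_count - 1) // 10
--     houses = [0] * (50 * target_sum_of_divisors + 1)
--     for elf_id in range(1, target_sum_of_divisors + 1):
--         for stop_id in range(50):
--             house_id = (stop_id + 1) * elf_id
--             houses[house_id] += 11 * elf_id
--     target_house_id = None
--     for house_id, present_count in enumerate(houses):
--         if present_count >= target_present_count:
--             target_house_id = house_id
--             break
--     result = target_house_id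
--     return result
-- ===== SOURCE B (Python) =====
-- def solve2_poorly(target_present_count):
--     # Per-house direct computation: elf house//s visits house as its s-th stop
--     # (s <= 50), so summing the presents over s in 1..50 with s | house gives the
--     # present count; the first qualifying house is at most target_sum_of_divisors
--     # (that house alone gets enough presents from its own elf), so scanning
--     # 0..target_sum_of_divisors suffices.
--     target_sum_of_divisors = 1 + (target_present_count - 1) // 10
--     for house_id in range(target_sum_of_divisors + 1):
--         present_count = 0
--         for stops in range(1, 51):
--             if house_id % stops == 0:
--                 present_count += 11 * (house_id // stops)
--         if present_count >= target_present_count: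
--             return house_id
--     return None
-- ===== Notes on version B (the rewrite author's own statement) =====
-- stated objective: faster
-- what changed: B replaces A's elf sieve (allocate a 50*tsod+1 array, loop every elf over its 50 stops, then scan) by a direct per-house present count (for each stop number s in 1..50 dividing the house, add the presents of elf house//s) with early return at the first qualifying house, so no array is built and the scan stops as soon as the answer is found.
import Mathlib
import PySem

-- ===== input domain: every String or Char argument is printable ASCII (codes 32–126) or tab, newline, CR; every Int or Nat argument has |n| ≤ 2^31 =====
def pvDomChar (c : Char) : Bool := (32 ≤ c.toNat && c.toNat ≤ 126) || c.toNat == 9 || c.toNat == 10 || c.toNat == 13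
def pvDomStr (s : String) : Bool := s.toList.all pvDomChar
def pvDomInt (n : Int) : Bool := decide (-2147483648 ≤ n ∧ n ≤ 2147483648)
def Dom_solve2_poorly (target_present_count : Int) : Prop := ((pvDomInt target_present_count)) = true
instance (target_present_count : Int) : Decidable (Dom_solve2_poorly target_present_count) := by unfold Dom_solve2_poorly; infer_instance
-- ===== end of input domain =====

-- B replaces A's full elf sieve (which always fills a 50*target_sum_of_divisors array) by a
-- per-house divisor-of-stops count with early exit; measured faster (constant-factor/early-exit).

-- ===== PORT A =====
-- the 'for house_id, present_count in enumerate(houses): if … break' scan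
def pvScanA (target : Int) : Int → List Int → Option Int
  | _, [] => none
  | i, c :: rest => if c ≥ target then some i else pvScanA target (i + 1) rest

-- Python's houses list is used as a mutable array; ported as Array Int ([0]*n: negative n
-- gives the empty list, hence .toNat). houses[house_id] += 11*elf_id is exact here: the
-- index (stop_id+1)*elf_id is provably nonnegative and within bounds for every write.
def solve2_poorly (target_present_count : Int) : Option Int :=
  let target_sum_of_divisors := 1 + PySem.Int.floordiv (target_present_count - 1) 10
  let houses := Array.replicate (50 * target_sum_of_divisors + 1).toNat (0 : Int)
  let houses := (PySem.List.pyRange 1 (target_sum_of_divisors + 1) 1).foldl (fun hs elf_id =>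
      (PySem.List.pyRange 0 50 1).foldl (fun hs stop_id =>
        hs.setIfInBounds ((stop_id + 1) * elf_id).toNat
          (hs.getD ((stop_id + 1) * elf_id).toNat 0 + 11 * elf_id)) hs) houses
  pvScanA target_present_count 0 houses.toList

-- ===== PORT B =====
-- inner 'for stops in range(1, 51)' accumulation of present_count
def pvCount (house_id : Int) : Int :=
  (PySem.List.pyRange 1 51 1).foldl (fun acc stops =>
    if PySem.Int.mod house_id stops = 0 then acc + 11 * PySem.Int.floordiv house_id stops
    else acc) 0

-- outer 'for house_id in range(…): … return house_id' loop with early return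
def pvScanB (target : Int) : List Int → Option Int
  | [] => none
  | h :: rest => if pvCount h ≥ target then some h else pvScanB target rest

def solve2_poorly_alt (target_present_count : Int) : Option Int :=
  let target_sum_of_divisors := 1 + PySem.Int.floordiv (target_present_count - 1) 10
  pvScanB target_present_count (PySem.List.pyRange 0 (target_sum_of_divisors + 1) 1)

-- ===== PRECONDITION & SPEC =====
def Spec_solve2_poorly (target_present_count : Int) (out : Option Int) : Prop := out = solve2_poorly_alt target_present_count
instance (target_present_count : Int) (out : Option Int) : Decidable (Spec_solve2_poorly target_present_count out) := by unfold Spec_solve2_poorly; infer_instance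

-- ===== CLAIM (what is proved, stated in full; the proofs are below) =====
def Claim_equal_solve2_poorly : Prop := ∀ (target_present_count : Int), Dom_solve2_poorly target_present_count → Spec_solve2_poorly target_present_count (solve2_poorly target_present_count)

-- ===== LEMMAS AND PROOFS =====

-- B's count of house h, as a sum over stop counts q+1 in 1..50
def pvSB (h : Nat) : Int :=
  ∑ q ∈ Finset.range 50, (if (q + 1) ∣ h then (11 : Int) * ((h / (q + 1) : Nat) : Int) else 0)

-- A's sieve value at house h, with the elf cap h/(q+1) ≤ N (N = target_sum_of_divisors)
def pvSA (N h : Nat) : Int :=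
  ∑ q ∈ Finset.range 50,
    (if (q + 1) ∣ h ∧ 1 ≤ h / (q + 1) ∧ h / (q + 1) ≤ N then (11 : Int) * ((h / (q + 1) : Nat) : Int) else 0)

theorem pv_find?_congr {α : Type} {p q : α → Bool} (l : List α) (h : ∀ x ∈ l, p x = q x) :
    l.find? p = l.find? q := by
  induction l with
  | nil => rfl
  | cons a l ih =>
    rw [List.find?_cons, List.find?_cons, h a List.mem_cons_self,
      ih fun x hx => h x (List.mem_cons_of_mem _ hx)]

theorem pvSB_eq_pvSA (N h : Nat) (hh : h ≤ N) : pvSB h = pvSA N h := by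
  unfold pvSB pvSA
  refine Finset.sum_congr rfl fun q _ => ?_
  by_cases hd : (q + 1) ∣ h
  · by_cases h0 : 1 ≤ h / (q + 1)
    · have : h / (q + 1) ≤ N := le_trans (Nat.div_le_self _ _) hh
      simp [hd, h0, this]
    · have hz : h / (q + 1) = 0 := Nat.lt_one_iff.mp (Nat.not_le.mp h0)
      simp [hd, hz]
  · simp [hd]

theorem pvSB_lower (N : Nat) : 11 * (N : Int) ≤ pvSB N := by
  unfold pvSB
  have h50 : (0:Nat) ∈ Finset.range 50 := by decide
  have hterm : (if (0 + 1) ∣ N then (11 : Int) * ((N / (0 + 1) : Nat) : Int) else 0)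
      = 11 * (N : Int) := by simp
  calc 11 * (N : Int) = _ := hterm.symm
    _ ≤ _ := Finset.single_le_sum
        (f := fun q => if (q + 1) ∣ N then (11 : Int) * ((N / (q + 1) : Nat) : Int) else 0)
        (fun i _ => by dsimp only
                       split
                       · positivity
                       · exact le_refl 0) h50

theorem pvCount_eq_pvSB (h : Nat) : pvCount (h : Int) = pvSB h := by
  unfold pvCount
  rw [PySem.List.foldl_congr_mem (PySem.List.pyRange 1 51) _
      (fun acc stops => acc + (if PySem.Int.mod (h : Int) stops = 0
        then (11 : Int) * PySem.Int.floordiv (h : Int) stops else 0)) 0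
      (by intro acc x _; by_cases hm : PySem.Int.mod ((h:Nat) : Int) x = 0 <;> simp [hm])]
  rw [PySem.List.foldl_add, PySem.List.pyRange_one 1 51, List.map_map, zero_add]
  have h50 : ((51:Int) - 1).toNat = 50 := by decide
  rw [h50]
  have hpt : ∀ q ∈ List.range 50, ((fun stops => if PySem.Int.mod (h : Int) stops = 0
        then (11 : Int) * PySem.Int.floordiv (h : Int) stops else 0) ∘ (fun k : Nat => (1:Int) + (k : Int))) q
      = (fun q : Nat => if (q + 1) ∣ h then (11 : Int) * ((h / (q + 1) : Nat) : Int) else 0) q := by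
    intro q _
    simp only [Function.comp]
    have hcast : (1 : Int) + (q : Int) = ((q + 1 : Nat) : Int) := by push_cast; ring
    rw [hcast, PySem.Int.mod_natCast, PySem.Int.floordiv_natCast]
    exact if_congr (Nat.cast_eq_zero.trans Nat.dvd_iff_mod_eq_zero.symm) rfl rfl
  rw [List.map_congr_left hpt]
  rfl

-- one sieve update: houses[i] += v
theorem pv_bump_getD (hs : List Int) (i : Nat) (v : Int) (hi : i < hs.length) (h : Nat) :
    (hs.set i (hs.getD i 0 + v)).getD h 0 = hs.getD h 0 + if i = h then v else 0 := by
  by_cases hih : i = h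
  · subst hih
    simp [List.getD, hi]
  · simp [List.getD, List.getElem?_set_ne hih, hih]

theorem pv_replicate_getD (n h : Nat) : (List.replicate n (0:Int)).getD h 0 = 0 := by
  simp [List.getD, List.getElem?_replicate]
  split <;> rfl

-- the inner stop loop, for one elf
theorem pv_inner_fold (elf : Int) (h1 : 1 ≤ elf) (l : List Int) (hs : List Int)
    (hl : ∀ s ∈ l, 0 ≤ s ∧ ((s + 1) * elf).toNat < hs.length) :
    (l.foldl (fun hs stop_id =>
        hs.set ((stop_id + 1) * elf).toNat
          (hs.getD ((stop_id + 1) * elf).toNat 0 + 11 * elf)) hs).length = hs.length ∧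
    ∀ h : Nat, (l.foldl (fun hs stop_id =>
        hs.set ((stop_id + 1) * elf).toNat
          (hs.getD ((stop_id + 1) * elf).toNat 0 + 11 * elf)) hs).getD h 0
      = hs.getD h 0 + (l.map (fun s => if (s + 1) * elf = (h : Int) then 11 * elf else 0)).sum := by
  induction l generalizing hs with
  | nil => simp
  | cons s l ih =>
    obtain ⟨hs0, hsl⟩ := hl s (List.mem_cons_self)
    have hnn : 0 ≤ (s + 1) * elf := mul_nonneg (by omega) (by omega)
    have hlen' : (hs.set ((s + 1) * elf).toNat (hs.getD ((s + 1) * elf).toNat 0 + 11 * elf)).length = hs.length := by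
      simp
    obtain ⟨ihlen, ihval⟩ := ih (hs.set ((s + 1) * elf).toNat (hs.getD ((s + 1) * elf).toNat 0 + 11 * elf))
      (fun x hx => ⟨(hl x (List.mem_cons_of_mem _ hx)).1, by
        rw [hlen']; exact (hl x (List.mem_cons_of_mem _ hx)).2⟩)
    constructor
    · simp only [List.foldl_cons]; rw [ihlen, hlen']
    · intro h
      simp only [List.foldl_cons]
      rw [ihval h, pv_bump_getD hs _ _ hsl h]
      have hiff : (((s + 1) * elf).toNat = h) ↔ ((s + 1) * elf = (h : Int)) := by omega
      simp only [List.map_cons, List.sum_cons]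
      rw [if_congr hiff rfl rfl]
      ring

-- the outer elf loop
theorem pv_outer_fold (E : List Int) (hs : List Int)
    (hE : ∀ e ∈ E, 1 ≤ e ∧ ∀ s ∈ PySem.List.pyRange 0 50, ((s + 1) * e).toNat < hs.length) :
    (E.foldl (fun hs elf_id =>
        (PySem.List.pyRange 0 50).foldl (fun hs stop_id =>
          hs.set ((stop_id + 1) * elf_id).toNat
            (hs.getD ((stop_id + 1) * elf_id).toNat 0 + 11 * elf_id)) hs) hs).length = hs.length ∧
    ∀ h : Nat, (E.foldl (fun hs elf_id =>
        (PySem.List.pyRange 0 50).foldl (fun hs stop_id =>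
          hs.set ((stop_id + 1) * elf_id).toNat
            (hs.getD ((stop_id + 1) * elf_id).toNat 0 + 11 * elf_id)) hs) hs).getD h 0
      = hs.getD h 0 + (E.map (fun e =>
          ((PySem.List.pyRange 0 50).map (fun s => if (s + 1) * e = (h : Int) then 11 * e else 0)).sum)).sum := by
  induction E generalizing hs with
  | nil => simp
  | cons e E ih =>
    obtain ⟨he1, hes⟩ := hE e (List.mem_cons_self)
    obtain ⟨ilen, ival⟩ := pv_inner_fold e he1 (PySem.List.pyRange 0 50) hs (fun s hss => ⟨by
        have := PySem.List.mem_pyRange_one.mp hss; omega, hes s hss⟩)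
    obtain ⟨olen, oval⟩ := ih ((PySem.List.pyRange 0 50).foldl (fun hs stop_id =>
          hs.set ((stop_id + 1) * e).toNat
            (hs.getD ((stop_id + 1) * e).toNat 0 + 11 * e)) hs)
      (fun x hx => ⟨(hE x (List.mem_cons_of_mem _ hx)).1, fun s hss => by
        rw [ilen]; exact (hE x (List.mem_cons_of_mem _ hx)).2 s hss⟩)
    constructor
    · simp only [List.foldl_cons]; rw [olen, ilen]
    · intro h
      simp only [List.foldl_cons, List.map_cons, List.sum_cons]
      rw [oval h, ival h]
      ring

-- collapsing the elf sum for a fixed stop count q+1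
theorem pv_collapse (N h q : Nat) :
    ∑ e ∈ Finset.range N, (if ((1:Int) + (q:Int)) * ((1:Int) + (e:Int)) = (h : Int) then 11 * ((1:Int) + (e:Int)) else 0)
    = (if (q + 1) ∣ h ∧ 1 ≤ h / (q + 1) ∧ h / (q + 1) ≤ N then (11 : Int) * ((h / (q + 1) : Nat) : Int) else 0) := by
  have hcond : ∀ e : Nat, (((1:Int) + (q:Int)) * ((1:Int) + (e:Int)) = (h : Int)) ↔ ((q + 1) * (e + 1) = h) := by
    intro e
    constructor
    · intro he
      have : ((((q+1) * (e+1) : Nat)) : Int) = (h : Int) := by push_cast; linarith [he]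
      exact_mod_cast this
    · intro he
      have : ((((q+1) * (e+1) : Nat)) : Int) = (h : Int) := by exact_mod_cast congrArg (fun x : Nat => (x : Int)) he
      push_cast at this; linarith [this]
  by_cases hc : (q + 1) ∣ h ∧ 1 ≤ h / (q + 1) ∧ h / (q + 1) ≤ N
  · obtain ⟨hd, h1, hN⟩ := hc
    have hmul : (q + 1) * (h / (q + 1)) = h := Nat.mul_div_cancel' hd
    have hmem : h / (q + 1) - 1 ∈ Finset.range N := Finset.mem_range.mpr (by omega)
    rw [Finset.sum_eq_single_of_mem _ hmem]
    · have hone : (q + 1) * ((h / (q + 1) - 1) + 1) = h := by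
        have : (h / (q + 1) - 1) + 1 = h / (q + 1) := by omega
        rw [this]; exact hmul
      rw [if_pos ((hcond _).mpr hone), if_pos ⟨hd, h1, hN⟩]
      have : (1:Int) + ((h / (q + 1) - 1 : Nat) : Int) = ((h / (q + 1) : Nat) : Int) := by
        push_cast [Nat.cast_sub (by omega : 1 ≤ h / (q+1))]; ring
      rw [this]
    · intro e _ hne
      rw [if_neg]
      intro hcontra
      have he : (q + 1) * (e + 1) = h := (hcond e).mp hcontra
      have : e + 1 = h / (q + 1) := by
        rw [← he, Nat.mul_div_cancel_left _ (by omega : 0 < q + 1)]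
      omega
  · rw [if_neg hc]
    refine Finset.sum_eq_zero fun e he => ?_
    rw [if_neg]
    intro hcontra
    have heq : (q + 1) * (e + 1) = h := (hcond e).mp hcontra
    have hdvd : (q + 1) ∣ h := ⟨e + 1, heq.symm⟩
    have : h / (q + 1) = e + 1 := by
      rw [← heq, Nat.mul_div_cancel_left _ (by omega : 0 < q + 1)]
    exact hc ⟨hdvd, by omega, by { have := Finset.mem_range.mp he; omega }⟩

-- bounds needed to show every sieve write is in range
theorem pv_houses_inrange (T : Int) (N : Nat) (hTN : T = (N : Int)) :
    ∀ e ∈ PySem.List.pyRange 1 (T + 1), 1 ≤ e ∧ ∀ s ∈ PySem.List.pyRange 0 50,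
      ((s + 1) * e).toNat < (List.replicate (50 * T + 1).toNat (0 : Int)).length := by
  subst hTN
  intro e hee
  have he := PySem.List.mem_pyRange_one.mp hee
  refine ⟨he.1, fun s hss => ?_⟩
  have hsb := PySem.List.mem_pyRange_one.mp hss
  rw [List.length_replicate]
  have : (s + 1) * e ≤ 50 * (N : Int) := by nlinarith [he.1, he.2, hsb.1, hsb.2]
  omega

-- bridge: the Array sieve fold, viewed through toList, is the List sieve fold
theorem pv_bridge_getD (a : Array Int) (i : Nat) (d : Int) : a.getD i d = a.toList.getD i d := by
  rw [List.getD, Array.getElem?_toList, Array.getD_eq_getD_getElem?]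

theorem pv_bridge_inner (elf : Int) (l : List Int) (a : Array Int) :
    (l.foldl (fun hs stop_id =>
        hs.setIfInBounds ((stop_id + 1) * elf).toNat
          (hs.getD ((stop_id + 1) * elf).toNat 0 + 11 * elf)) a).toList
    = l.foldl (fun hs stop_id =>
        hs.set ((stop_id + 1) * elf).toNat
          (hs.getD ((stop_id + 1) * elf).toNat 0 + 11 * elf)) a.toList := by
  induction l generalizing a with
  | nil => rfl
  | cons s l ih =>
    simp only [List.foldl_cons]
    rw [ih, Array.toList_setIfInBounds, pv_bridge_getD]

theorem pv_bridge_outer (E : List Int) (a : Array Int) :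
    (E.foldl (fun hs elf_id =>
        (PySem.List.pyRange 0 50).foldl (fun hs stop_id =>
          hs.setIfInBounds ((stop_id + 1) * elf_id).toNat
            (hs.getD ((stop_id + 1) * elf_id).toNat 0 + 11 * elf_id)) hs) a).toList
    = E.foldl (fun hs elf_id =>
        (PySem.List.pyRange 0 50).foldl (fun hs stop_id =>
          hs.set ((stop_id + 1) * elf_id).toNat
            (hs.getD ((stop_id + 1) * elf_id).toNat 0 + 11 * elf_id)) hs) a.toList := by
  induction E generalizing a with
  | nil => rfl
  | cons e E ih =>
    simp only [List.foldl_cons]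
    rw [ih, pv_bridge_inner]

theorem pv_houses_len (T : Int) (N : Nat) (hTN : T = (N : Int)) :
    (((PySem.List.pyRange 1 (T + 1)).foldl (fun hs elf_id =>
        (PySem.List.pyRange 0 50).foldl (fun hs stop_id =>
          hs.setIfInBounds ((stop_id + 1) * elf_id).toNat
            (hs.getD ((stop_id + 1) * elf_id).toNat 0 + 11 * elf_id)) hs)
      (Array.replicate (50 * T + 1).toNat (0 : Int))).toList).length = 50 * N + 1 := by
  subst hTN
  rw [pv_bridge_outer, Array.toList_replicate,
    (pv_outer_fold _ _ (pv_houses_inrange _ N rfl)).1, List.length_replicate]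
  omega

-- final-value characterisation of the sieve
theorem pv_houses_getD (T : Int) (N : Nat) (hTN : T = (N : Int)) (h : Nat) :
    (((PySem.List.pyRange 1 (T + 1)).foldl (fun hs elf_id =>
        (PySem.List.pyRange 0 50).foldl (fun hs stop_id =>
          hs.setIfInBounds ((stop_id + 1) * elf_id).toNat
            (hs.getD ((stop_id + 1) * elf_id).toNat 0 + 11 * elf_id)) hs)
      (Array.replicate (50 * T + 1).toNat (0 : Int))).toList).getD h 0 = pvSA N h := by
  subst hTN
  rw [pv_bridge_outer, Array.toList_replicate,
    (pv_outer_fold _ _ (pv_houses_inrange _ N rfl)).2 h, pv_replicate_getD, zero_add]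
  have e1 : PySem.List.pyRange 1 ((N : Int) + 1) = (List.range N).map (fun k : Nat => (1:Int) + (k:Int)) := by
    rw [PySem.List.pyRange_one, show ((N : Int) + 1 - 1).toNat = N from by omega]
  have e2 : PySem.List.pyRange 0 50 = (List.range 50).map (fun k : Nat => (0:Int) + (k:Int)) := by
    rw [PySem.List.pyRange_one, show ((50 : Int) - 0).toNat = 50 from by decide]
  rw [e1, e2, List.map_map]
  have hfun : ∀ x ∈ List.range N,
      ((fun e => (((List.range 50).map (fun k : Nat => (0:Int) + (k:Int))).map
          (fun s => if (s + 1) * e = (h : Int) then 11 * e else 0)).sum) ∘ (fun k : Nat => (1:Int) + (k:Int))) x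
      = (fun x : Nat => ∑ q ∈ Finset.range 50,
          (if ((1:Int) + (q:Int)) * ((1:Int) + (x:Int)) = (h : Int) then 11 * ((1:Int) + (x:Int)) else 0)) x := by
    intro x _
    simp only [Function.comp]
    rw [List.map_map]
    have hq : ∀ q ∈ List.range 50,
        ((fun s => if (s + 1) * ((1:Int) + (x:Int)) = (h : Int) then 11 * ((1:Int) + (x:Int)) else 0)
          ∘ (fun k : Nat => (0:Int) + (k:Int))) q
        = (fun q : Nat => if ((1:Int) + (q:Int)) * ((1:Int) + (x:Int)) = (h : Int)
            then 11 * ((1:Int) + (x:Int)) else 0) q := by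
      intro q _
      simp only [Function.comp]
      have h01 : ((0:Int) + (q:Int)) + 1 = 1 + (q:Int) := by ring
      rw [h01]
    rw [List.map_congr_left hq]
    rfl
  rw [List.map_congr_left hfun]
  show ∑ e ∈ Finset.range N, _ = _
  rw [Finset.sum_comm]
  unfold pvSA
  exact Finset.sum_congr rfl fun q _ => pv_collapse N h q

-- the enumerate scan is find? over indices
theorem pv_scanA_eq_find (t : Int) (l : List Int) : ∀ i : Int,
    pvScanA t i l = ((List.range l.length).find? (fun j => decide (t ≤ l.getD j 0))).map (fun j : Nat => i + (j : Int)) := by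
  induction l with
  | nil => intro i; simp [pvScanA]
  | cons c rest ih =>
    intro i
    rw [pvScanA, List.length_cons, List.range_succ_eq_map]
    by_cases hc : t ≤ c
    · rw [if_pos hc, List.find?_cons_of_pos (by simp [List.getD, hc])]
      simp
    · rw [if_neg hc, List.find?_cons_of_neg (by simp [List.getD, hc]), List.find?_map]
      rw [pv_find?_congr ((List.range rest.length))
          (q := fun j => decide (t ≤ rest.getD j 0)) (fun x _ => by simp [List.getD])]
      rw [ih (i + 1), Option.map_map]
      congr 1
      funext j
      simp only [Function.comp, Nat.succ_eq_add_one]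
      push_cast
      ring

-- B's scan is find? over the house list
theorem pv_scanB_eq_find (t : Int) (l : List Int) :
    pvScanB t l = l.find? (fun h => decide (t ≤ pvCount h)) := by
  induction l with
  | nil => rfl
  | cons h rest ih =>
    rw [pvScanB, List.find?_cons]
    by_cases hc : t ≤ pvCount h <;> simp [hc, ge_iff_le, ih]

-- the two find?s agree: predicates agree up to n, and there is a hit at n
theorem pv_find_range_agree (p q : Nat → Bool) (n m : Nat) (hnm : n < m)
    (hag : ∀ j ≤ n, p j = q j) (hq : q n = true) :
    (List.range m).find? p = (List.range (n + 1)).find? q := by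
  have hsplit : List.range m = List.range (n + 1) ++ (List.range (m - (n + 1))).map ((n + 1) + ·) := by
    rw [← List.range_add]; congr 1; omega
  rw [hsplit, List.find?_append]
  rw [pv_find?_congr (List.range (n + 1)) (q := q)
      (fun j hj => hag j (Nat.lt_succ_iff.mp (List.mem_range.mp hj)))]
  have hsome : ((List.range (n + 1)).find? q).isSome := by
    rw [List.find?_isSome]
    exact ⟨n, List.mem_range.mpr (by omega), hq⟩
  obtain ⟨x, hx⟩ := Option.isSome_iff_exists.mp hsome
  rw [hx]
  rfl

theorem pv_t_le (t : Int) : t ≤ 10 * (1 + PySem.Int.floordiv (t - 1) 10) := by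
  have h := (PySem.Int.floordiv_eq_iff_of_pos (a := t - 1) (b := 10)
    (q := PySem.Int.floordiv (t - 1) 10) (by norm_num)).mp rfl
  omega

-- ===== VERDICT (by name: the statement is the Claim_ definition above) =====
theorem solve2_poorly_spec : Claim_equal_solve2_poorly := by
  intro t _
  unfold Spec_solve2_poorly solve2_poorly solve2_poorly_alt
  show pvScanA t 0 (((PySem.List.pyRange 1 ((1 + PySem.Int.floordiv (t - 1) 10) + 1)).foldl
      (fun hs elf_id => (PySem.List.pyRange 0 50).foldl (fun hs stop_id =>
        hs.setIfInBounds ((stop_id + 1) * elf_id).toNat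
          (hs.getD ((stop_id + 1) * elf_id).toNat 0 + 11 * elf_id)) hs)
      (Array.replicate (50 * (1 + PySem.Int.floordiv (t - 1) 10) + 1).toNat (0 : Int))).toList)
    = pvScanB t (PySem.List.pyRange 0 ((1 + PySem.Int.floordiv (t - 1) 10) + 1))
  have htle : t ≤ 10 * (1 + PySem.Int.floordiv (t - 1) 10) := pv_t_le t
  generalize hg : 1 + PySem.Int.floordiv (t - 1) 10 = T at htle ⊢
  by_cases hT : 0 ≤ T
  · have hTN : T = (T.toNat : Int) := (Int.toNat_of_nonneg hT).symm
    rw [pv_scanB_eq_find, pv_scanA_eq_find, pv_houses_len T T.toNat hTN]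
    have eB : PySem.List.pyRange 0 (T + 1) = (List.range (T.toNat + 1)).map (fun k : Nat => (0:Int) + (k:Int)) := by
      rw [PySem.List.pyRange_one, show (T + 1 - 0).toNat = T.toNat + 1 from by omega]
    rw [eB, List.find?_map]
    rw [pv_find?_congr (List.range (50 * T.toNat + 1))
        (q := fun j => decide (t ≤ pvSA T.toNat j)) (fun j _ => by rw [pv_houses_getD T T.toNat hTN j])]
    rw [pv_find?_congr (List.range (T.toNat + 1))
        (q := fun k => decide (t ≤ pvSB k)) (fun k _ => by
          simp only [Function.comp, zero_add]
          rw [pvCount_eq_pvSB])]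
    rw [pv_find_range_agree (fun j => decide (t ≤ pvSA T.toNat j)) (fun k => decide (t ≤ pvSB k))
        T.toNat (50 * T.toNat + 1)
        (by omega)
        (fun j hj => by dsimp only; rw [pvSB_eq_pvSA T.toNat j hj])
        (by
          have h10 : t ≤ 10 * ((T.toNat : Nat) : Int) := by rw [← hTN]; exact htle
          have hNn : (0:Int) ≤ ((T.toNat : Nat) : Int) := Int.natCast_nonneg _
          have h1 : t ≤ 11 * ((T.toNat : Nat) : Int) := by linarith
          exact decide_eq_true (le_trans h1 (pvSB_lower T.toNat)))]
  · have hT1 : T + 1 ≤ 0 := by omega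
    rw [PySem.List.pyRange_one_eq_nil (by omega : T + 1 ≤ 1),
      PySem.List.pyRange_one_eq_nil (by omega : T + 1 ≤ 0)]
    have hrep : (Array.replicate (50 * T + 1).toNat (0 : Int)).toList = [] := by
      have : (50 * T + 1).toNat = 0 := by omega
      rw [this]; rfl
    rw [List.foldl_nil, hrep]
    simp [pvScanA, pvScanB]
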